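-- pv_equiv track=rewrite | github.com/kosy318/zogori_data_analysis | submission/01/201724409.py | check
-- ===== SOURCE A (Python) =====
-- def check(s, start, end, cnt):
--     while start < end:
--         if s[start] != s[end]:
--             cnt += 1
--             if s[start+1] == s[end] and s[start] == s[end-1]:
--                 cnt1 = check(s, start+1, end, cnt)
--                 if cnt1 >= 2:
--                     return check(s, start, end-1, cnt)
--                 else:
--                     return cnt1
--
--             elif s[start+1] == s[end]:
--                 start += 1
--
--             elif s[start] == s[end-1]:
--                 end -= 1
--
--             else:
--                 return 2
--
--             if cnt >= 2:
--                 return cnt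
--
--         start += 1
--         end -= 1
--
--     return cnt
-- ===== SOURCE B (Python) =====
-- def _trim(s, start, end):
--     """Shrink the window inward past matching outer pairs; stop at the first
--     mismatch or when the indices cross."""
--     while start < end and s[start] == s[end]:
--         start, end = start + 1, end - 1
--     return start, end
--
--
-- def check(s, start, end, cnt):
--     start, end = _trim(s, start, end)
--     if start >= end:
--         return cnt
--     cnt += 1
--     skip_left = s[start + 1] == s[end]
--     skip_right = s[start] == s[end - 1]
--     if skip_left and skip_right:
--         c1 = check(s, start + 1, end, cnt)
--         return check(s, start, end - 1, cnt) if c1 >= 2 else c1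
--     if skip_left:
--         return cnt if cnt >= 2 else check(s, start + 2, end - 1, cnt)
--     if skip_right:
--         return cnt if cnt >= 2 else check(s, start + 1, end - 2, cnt)
--     return 2
-- ===== Notes on version B (the rewrite author's own statement) =====
-- stated objective: alternative
-- what changed: B replaces A's interleaved while-loop (which re-tests the mismatch branches on every step) by a two-phase decomposition: a _trim helper scans past all matching outer pairs first, and recursion happens only at a mismatch, with the branch logic as flat early returns.
import Mathlib
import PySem

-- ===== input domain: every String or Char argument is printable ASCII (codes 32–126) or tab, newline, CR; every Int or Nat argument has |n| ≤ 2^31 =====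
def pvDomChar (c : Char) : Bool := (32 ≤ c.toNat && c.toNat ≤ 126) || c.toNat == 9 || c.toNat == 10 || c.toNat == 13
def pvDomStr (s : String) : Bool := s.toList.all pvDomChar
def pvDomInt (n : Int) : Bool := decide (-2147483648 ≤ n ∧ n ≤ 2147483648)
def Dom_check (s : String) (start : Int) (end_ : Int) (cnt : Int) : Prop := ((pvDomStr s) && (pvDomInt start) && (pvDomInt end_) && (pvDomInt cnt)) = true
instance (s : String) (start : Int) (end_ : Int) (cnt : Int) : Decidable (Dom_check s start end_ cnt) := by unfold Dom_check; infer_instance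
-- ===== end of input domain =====

-- B separates the matching-pair scan (a helper) from the mismatch handling (recursion only at
-- mismatches, early returns), instead of A's interleaved while-loop; same values, same cost.

-- ===== PORT A =====
-- A's while loop becomes the obvious recursion over its state (start, end_, cnt); the Nat fuel
-- only makes the recursion structural (fuel = window width suffices: every step shrinks the
-- window).  Indexing is PySem.Str.pyGet? (exact Python semantics incl. negative indices;
-- none = IndexError, excluded by Pre_check below).
def checkGo (s : String) : Nat → Int → Int → Int → Int
  | 0, _, _, cnt => cnt
  | fuel+1, start, end_, cnt =>
    if start < end_ then
      if PySem.Str.pyGet? s start ≠ PySem.Str.pyGet? s end_ then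
        -- cnt += 1
        if PySem.Str.pyGet? s (start+1) = PySem.Str.pyGet? s end_ ∧
           PySem.Str.pyGet? s start = PySem.Str.pyGet? s (end_-1) then
          let cnt1 := checkGo s fuel (start+1) end_ (cnt+1)
          if cnt1 ≥ 2 then checkGo s fuel start (end_-1) (cnt+1) else cnt1
        else if PySem.Str.pyGet? s (start+1) = PySem.Str.pyGet? s end_ then
          -- start += 1; then the cnt>=2 guard; then start += 1, end -= 1 and the loop continues
          if cnt+1 ≥ 2 then cnt+1 else checkGo s fuel (start+2) (end_-1) (cnt+1)
        else if PySem.Str.pyGet? s start = PySem.Str.pyGet? s (end_-1) then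
          -- end -= 1; then the cnt>=2 guard; then start += 1, end -= 1 and the loop continues
          if cnt+1 ≥ 2 then cnt+1 else checkGo s fuel (start+1) (end_-2) (cnt+1)
        else 2
      else checkGo s fuel (start+1) (end_-1) cnt
    else cnt

def check (s : String) (start : Int) (end_ : Int) (cnt : Int) : Int :=
  checkGo s (end_ - start).toNat start end_ cnt

-- ===== PORT B =====
-- _trim: shrink the window inward past matching outer pairs (fuel = window width suffices)
def trimGo (s : String) : Nat → Int → Int → Int × Int
  | 0, start, end_ => (start, end_)
  | fuel+1, start, end_ =>
    if start < end_ ∧ PySem.Str.pyGet? s start = PySem.Str.pyGet? s end_ then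
      trimGo s fuel (start+1) (end_-1)
    else (start, end_)

def skipEq (s : String) (start : Int) (end_ : Int) : Int × Int :=
  trimGo s (end_ - start).toNat start end_

def checkAltGo (s : String) : Nat → Int → Int → Int → Int
  | 0, _, _, cnt => cnt
  | fuel+1, start, end_, cnt =>
    let a := (skipEq s start end_).1
    let b := (skipEq s start end_).2
    if a ≥ b then cnt
    else
      -- cnt += 1; first mismatch is at (a, b)
      if PySem.Str.pyGet? s (a+1) = PySem.Str.pyGet? s b ∧
         PySem.Str.pyGet? s a = PySem.Str.pyGet? s (b-1) then
        let c1 := checkAltGo s fuel (a+1) b (cnt+1)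
        if c1 ≥ 2 then checkAltGo s fuel a (b-1) (cnt+1) else c1
      else if PySem.Str.pyGet? s (a+1) = PySem.Str.pyGet? s b then
        if cnt+1 ≥ 2 then cnt+1 else checkAltGo s fuel (a+2) (b-1) (cnt+1)
      else if PySem.Str.pyGet? s a = PySem.Str.pyGet? s (b-1) then
        if cnt+1 ≥ 2 then cnt+1 else checkAltGo s fuel (a+1) (b-2) (cnt+1)
      else 2

def check_alt (s : String) (start : Int) (end_ : Int) (cnt : Int) : Int :=
  checkAltGo s (end_ - start).toNat start end_ cnt

-- ===== PRECONDITION & SPEC =====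
-- Pre_check is exactly the inputs on which Python A returns: either the loop never runs
-- (start ≥ end), or every index the algorithm can touch (they all stay in [start, end]) is a
-- valid Python index, i.e. -len(s) ≤ start and end < len(s); outside this A raises IndexError.
def Pre_check (s : String) (start : Int) (end_ : Int) (cnt : Int) : Prop :=
  start ≥ end_ ∨ (-(s.toList.length : Int) ≤ start ∧ end_ < (s.toList.length : Int))
instance (s : String) (start : Int) (end_ : Int) (cnt : Int) : Decidable (Pre_check s start end_ cnt) := by unfold Pre_check; infer_instance

def pvWitness_check : String × Int × Int × Int := ("abca", 0, 3, 0)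

def Spec_check (s : String) (start : Int) (end_ : Int) (cnt : Int) (out : Int) : Prop := out = check_alt s start end_ cnt
instance (s : String) (start : Int) (end_ : Int) (cnt : Int) (out : Int) : Decidable (Spec_check s start end_ cnt out) := by unfold Spec_check; infer_instance

-- ===== CLAIM (what is proved, stated in full; the proofs are below) =====
def Claim_equal_check : Prop := ∀ (s : String) (start : Int) (end_ : Int) (cnt : Int), Dom_check s start end_ cnt → Pre_check s start end_ cnt → Spec_check s start end_ cnt (check s start end_ cnt)

-- ===== LEMMAS AND PROOFS =====

theorem trimGo_stop (s : String) (f : Nat) (a b : Int)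
    (h : ¬ (a < b ∧ PySem.Str.pyGet? s a = PySem.Str.pyGet? s b)) :
    trimGo s f a b = (a, b) := by
  cases f with
  | zero => rfl
  | succ f => rw [trimGo, if_neg h]

theorem trimGo_fuel (s : String) :
    ∀ f₁ f₂ : Nat, ∀ a b : Int, (b - a).toNat ≤ f₁ → (b - a).toNat ≤ f₂ →
      trimGo s f₁ a b = trimGo s f₂ a b := by
  intro f₁
  induction f₁ with
  | zero =>
    intro f₂ a b h1 h2
    have h : ¬ (a < b ∧ PySem.Str.pyGet? s a = PySem.Str.pyGet? s b) := by
      intro ⟨hlt, _⟩; omega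
    rw [trimGo_stop s _ a b h, trimGo_stop s _ a b h]
  | succ f₁ ih =>
    intro f₂ a b h1 h2
    by_cases h : a < b ∧ PySem.Str.pyGet? s a = PySem.Str.pyGet? s b
    · obtain ⟨f₂', rfl⟩ : ∃ k, f₂ = k + 1 := ⟨f₂ - 1, by omega⟩
      rw [trimGo, trimGo, if_pos h, if_pos h]
      exact ih f₂' (a+1) (b-1) (by omega) (by omega)
    · rw [trimGo_stop s _ a b h, trimGo_stop s _ a b h]

theorem skipEq_stop (s : String) (a b : Int)
    (h : ¬ (a < b ∧ PySem.Str.pyGet? s a = PySem.Str.pyGet? s b)) :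
    skipEq s a b = (a, b) := by
  unfold skipEq
  exact trimGo_stop s _ a b h

theorem skipEq_step (s : String) (a b : Int)
    (h : a < b ∧ PySem.Str.pyGet? s a = PySem.Str.pyGet? s b) :
    skipEq s a b = skipEq s (a+1) (b-1) := by
  unfold skipEq
  obtain ⟨g, hg⟩ : ∃ g, (b - a).toNat = g + 1 := ⟨(b - a).toNat - 1, by omega⟩
  rw [hg, trimGo, if_pos h]
  exact trimGo_fuel s g (b - 1 - (a + 1)).toNat (a+1) (b-1) (by omega) le_rfl

-- the trimmed window is no wider than the original
theorem skipEq_gap (s : String) (start : Int) (end_ : Int) :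
    (skipEq s start end_).2 - (skipEq s start end_).1 ≤ end_ - start := by
  have H : ∀ g : Nat, ∀ a b : Int, (b - a).toNat ≤ g →
      (skipEq s a b).2 - (skipEq s a b).1 ≤ b - a := by
    intro g
    induction g with
    | zero =>
      intro a b hg
      have h : ¬ (a < b ∧ PySem.Str.pyGet? s a = PySem.Str.pyGet? s b) := by
        intro ⟨h1, _⟩; omega
      rw [skipEq_stop s a b h]
    | succ g ih =>
      intro a b hg
      by_cases h : a < b ∧ PySem.Str.pyGet? s a = PySem.Str.pyGet? s b
      · rw [skipEq_step s a b h]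
        have := ih (a+1) (b-1) (by omega)
        omega
      · rw [skipEq_stop s a b h]
  exact H (end_ - start).toNat start end_ le_rfl

-- at the result of skipEq, either the window is empty or its end characters differ
theorem skipEq_fix (s : String) (start : Int) (end_ : Int) :
    ¬ ((skipEq s start end_).1 < (skipEq s start end_).2 ∧
       PySem.Str.pyGet? s (skipEq s start end_).1 = PySem.Str.pyGet? s (skipEq s start end_).2) := by
  have H : ∀ g : Nat, ∀ a b : Int, (b - a).toNat ≤ g →
      ¬ ((skipEq s a b).1 < (skipEq s a b).2 ∧
         PySem.Str.pyGet? s (skipEq s a b).1 = PySem.Str.pyGet? s (skipEq s a b).2) := by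
    intro g
    induction g with
    | zero =>
      intro a b hg
      have h : ¬ (a < b ∧ PySem.Str.pyGet? s a = PySem.Str.pyGet? s b) := by
        intro ⟨h1, _⟩; omega
      rw [skipEq_stop s a b h]
      exact h
    | succ g ih =>
      intro a b hg
      by_cases h : a < b ∧ PySem.Str.pyGet? s a = PySem.Str.pyGet? s b
      · rw [skipEq_step s a b h]
        exact ih (a+1) (b-1) (by omega)
      · rw [skipEq_stop s a b h]
        exact h
  exact H (end_ - start).toNat start end_ le_rfl

theorem checkGo_stop (s : String) (f : Nat) (a b c : Int) (h : b ≤ a) :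
    checkGo s f a b c = c := by
  cases f with
  | zero => rfl
  | succ f => rw [checkGo, if_neg (by omega : ¬ a < b)]

-- any fuel at least the window width gives the same value
theorem checkGo_fuel (s : String) :
    ∀ f₁ f₂ : Nat, ∀ a b c : Int, (b - a).toNat ≤ f₁ → (b - a).toNat ≤ f₂ →
      checkGo s f₁ a b c = checkGo s f₂ a b c := by
  intro f₁
  induction f₁ with
  | zero =>
    intro f₂ a b c h1 h2
    rw [checkGo_stop s _ a b c (by omega), checkGo_stop s _ a b c (by omega)]
  | succ f₁ ih =>
    intro f₂ a b c h1 h2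
    by_cases hab : a < b
    · obtain ⟨f₂', rfl⟩ : ∃ k, f₂ = k + 1 := ⟨f₂ - 1, by omega⟩
      rw [checkGo, checkGo, if_pos hab, if_pos hab]
      by_cases hne : PySem.Str.pyGet? s a ≠ PySem.Str.pyGet? s b
      · rw [if_pos hne, if_pos hne]
        have e1 := ih f₂' (a+1) b (c+1) (by omega) (by omega)
        have e2 := ih f₂' a (b-1) (c+1) (by omega) (by omega)
        have e3 := ih f₂' (a+2) (b-1) (c+1) (by omega) (by omega)
        have e4 := ih f₂' (a+1) (b-2) (c+1) (by omega) (by omega)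
        rw [e1, e2, e3, e4]
      · rw [if_neg hne, if_neg hne]
        exact ih f₂' (a+1) (b-1) c (by omega) (by omega)
    · rw [checkGo_stop s _ a b c (by omega), checkGo_stop s _ a b c (by omega)]

-- A silently performs the same trimming: matching end pairs just step the loop
theorem check_skip (s : String) :
    ∀ g : Nat, ∀ a b c : Int, ∀ f : Nat, (b - a).toNat ≤ g → (b - a).toNat ≤ f →
      checkGo s f a b c = checkGo s f (skipEq s a b).1 (skipEq s a b).2 c := by
  intro g
  induction g with
  | zero =>
    intro a b c f hg hf
    have h : ¬ (a < b ∧ PySem.Str.pyGet? s a = PySem.Str.pyGet? s b) := by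
      intro ⟨h1, _⟩; omega
    rw [skipEq_stop s a b h]
  | succ g ih =>
    intro a b c f hg hf
    by_cases h : a < b ∧ PySem.Str.pyGet? s a = PySem.Str.pyGet? s b
    · rw [skipEq_step s a b h]
      obtain ⟨f', rfl⟩ : ∃ k, f = k + 1 := ⟨f - 1, by omega⟩
      have step : checkGo s (f'+1) a b c = checkGo s (f'+1) (a+1) (b-1) c := by
        rw [checkGo, if_pos h.1, if_neg (not_not_intro h.2)]
        exact checkGo_fuel s f' (f'+1) (a+1) (b-1) c (by omega) (by omega)
      rw [step]
      exact ih (a+1) (b-1) c (f'+1) (by omega) (by omega)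
    · rw [skipEq_stop s a b h]

theorem checkAltGo_stop (s : String) (f : Nat) (a b c : Int) (h : b ≤ a) :
    checkAltGo s f a b c = c := by
  cases f with
  | zero => rfl
  | succ f =>
    have hstop : ¬ (a < b ∧ PySem.Str.pyGet? s a = PySem.Str.pyGet? s b) := by
      intro ⟨h1, _⟩; omega
    rw [checkAltGo]
    simp only [skipEq_stop s a b hstop]
    rw [if_pos (by omega : a ≥ b)]

theorem check_eq_alt (s : String) (start : Int) (end_ : Int) (cnt : Int) :
    check s start end_ cnt = check_alt s start end_ cnt := by
  have H : ∀ g : Nat, ∀ st en c : Int, ∀ f₁ f₂ : Nat,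
      (en - st).toNat ≤ g → (en - st).toNat ≤ f₁ → (en - st).toNat ≤ f₂ →
      checkGo s f₁ st en c = checkAltGo s f₂ st en c := by
    intro g
    induction g with
    | zero =>
      intro st en c f₁ f₂ hg h1 h2
      rw [checkGo_stop s f₁ st en c (by omega), checkAltGo_stop s f₂ st en c (by omega)]
    | succ g ih =>
      intro st en c f₁ f₂ hg h1 h2
      rw [check_skip s (g+1) st en c f₁ hg h1]
      obtain ⟨a, b, hp⟩ : ∃ a b, skipEq s st en = (a, b) := ⟨_, _, rfl⟩
      have hgap : b - a ≤ en - st := by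
        have := skipEq_gap s st en; rw [hp] at this; exact this
      have hfix : ¬ (a < b ∧ PySem.Str.pyGet? s a = PySem.Str.pyGet? s b) := by
        have := skipEq_fix s st en; rw [hp] at this; exact this
      rw [hp]
      show checkGo s f₁ a b c = checkAltGo s f₂ st en c
      by_cases hab : b ≤ a
      · rw [checkGo_stop s f₁ a b c hab]
        -- check_alt also returns c: the trimmed window is empty
        cases f₂ with
        | zero => rfl
        | succ f₂ =>
          rw [checkAltGo]
          simp only [hp]
          rw [if_pos (by omega : a ≥ b)]
      · have hlt : a < b := by omega
        have hne : PySem.Str.pyGet? s a ≠ PySem.Str.pyGet? s b := fun hEq => hfix ⟨hlt, hEq⟩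
        obtain ⟨f₁', rfl⟩ : ∃ k, f₁ = k + 1 := ⟨f₁ - 1, by omega⟩
        obtain ⟨f₂', rfl⟩ : ∃ k, f₂ = k + 1 := ⟨f₂ - 1, by omega⟩
        have e1 : checkGo s f₁' (a+1) b (c+1) = checkAltGo s f₂' (a+1) b (c+1) :=
          ih _ _ _ _ _ (by omega) (by omega) (by omega)
        have e2 : checkGo s f₁' a (b-1) (c+1) = checkAltGo s f₂' a (b-1) (c+1) :=
          ih _ _ _ _ _ (by omega) (by omega) (by omega)
        have e3 : checkGo s f₁' (a+2) (b-1) (c+1) = checkAltGo s f₂' (a+2) (b-1) (c+1) :=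
          ih _ _ _ _ _ (by omega) (by omega) (by omega)
        have e4 : checkGo s f₁' (a+1) (b-2) (c+1) = checkAltGo s f₂' (a+1) (b-2) (c+1) :=
          ih _ _ _ _ _ (by omega) (by omega) (by omega)
        rw [checkGo, if_pos hlt, if_pos hne]
        rw [checkAltGo]
        simp only [hp]
        rw [if_neg (by omega : ¬ a ≥ b)]
        rw [e1, e2, e3, e4]
  exact H (end_ - start).toNat start end_ cnt (end_ - start).toNat (end_ - start).toNat
    le_rfl le_rfl le_rfl

-- ===== VERDICT (by name: the statement is the Claim_ definition above) =====
theorem check_spec : Claim_equal_check := by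
  intro s start end_ cnt _ _
  unfold Spec_check
  exact check_eq_alt s start end_ cnt
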